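-- pv_equiv track=rewrite | github.com/abjugard/advent-of-code-2015 | src/day16-aunt_sue.py | analyse_data_points
-- ===== SOURCE A (Python) =====
-- sue_criteria = {
--   'children': 3,
--   'cats': 7,
--   'samoyeds': 2,
--   'pomeranians': 3,
--   'akitas': 0,
--   'vizslas': 0,
--   'goldfish': 5,
--   'trees': 3,
--   'cars': 2,
--   'perfumes': 1,
-- }
--
-- def analyse_data_points(data, ranges=False):
--   for sue, data_points in data:
--     for key, value in sue_criteria.items():
--       if key not in data_points:
--         continue
--       if ranges and key in ['cats', 'trees']:
--         if data_points[key] <= value: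
--           break
--       elif ranges and key in ['pomeranians', 'goldfish']:
--         if data_points[key] >= value:
--           break
--       elif data_points[key] != value:
--         break
--     else:
--       return sue
--   return None
-- ===== SOURCE B (Python) =====
-- sue_criteria = {
--   'children': 3,
--   'cats': 7,
--   'samoyeds': 2,
--   'pomeranians': 3,
--   'akitas': 0,
--   'vizslas': 0,
--   'goldfish': 5,
--   'trees': 3,
--   'cars': 2,
--   'perfumes': 1,
-- }
--
-- def analyse_data_points(data, ranges=False):
--   # Criterion-major: one filtering pass per criterion over a shrinking
--   # candidate list; the first survivor of all passes is the answer.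
--   candidates = list(data)
--   for key, value in sue_criteria.items():
--     if ranges and key in ('cats', 'trees'):
--       candidates = [(sue, dp) for sue, dp in candidates
--                     if key not in dp or dp[key] > value]
--     elif ranges and key in ('pomeranians', 'goldfish'):
--       candidates = [(sue, dp) for sue, dp in candidates
--                     if key not in dp or dp[key] < value]
--     else:
--       candidates = [(sue, dp) for sue, dp in candidates
--                     if key not in dp or dp[key] == value]
--   return candidates[0][0] if candidates else None
-- ===== Notes on version B (the rewrite author's own statement) =====
-- stated objective: alternative
-- what changed: Inverts the loop nesting: instead of A's sue-major scan with an inner criteria loop and break/for-else, B runs one filtering pass per criterion over a shrinking candidate list (criterion-major staged passes) and returns the first survivor.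
import Mathlib
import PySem

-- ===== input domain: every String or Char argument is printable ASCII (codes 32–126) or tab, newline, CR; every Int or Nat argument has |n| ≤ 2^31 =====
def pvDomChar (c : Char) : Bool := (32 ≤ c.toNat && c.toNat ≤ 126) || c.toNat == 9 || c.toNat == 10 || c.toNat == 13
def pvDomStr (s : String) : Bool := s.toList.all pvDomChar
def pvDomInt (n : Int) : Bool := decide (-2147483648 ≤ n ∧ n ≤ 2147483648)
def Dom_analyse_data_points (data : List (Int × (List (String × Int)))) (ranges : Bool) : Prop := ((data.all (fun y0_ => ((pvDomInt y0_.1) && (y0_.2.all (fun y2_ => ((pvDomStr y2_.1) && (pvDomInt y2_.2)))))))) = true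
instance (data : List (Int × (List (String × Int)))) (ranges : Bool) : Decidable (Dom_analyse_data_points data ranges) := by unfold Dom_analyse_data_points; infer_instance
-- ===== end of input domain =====

-- B inverts the loop nesting: one filtering pass per criterion over a shrinking
-- candidate list instead of A's sue-major scan with break/for-else (objective: alternative).

-- ===== PORT A =====
def sue_criteria : List (String × Int) :=
  [("children", 3), ("cats", 7), ("samoyeds", 2), ("pomeranians", 3), ("akitas", 0),
   ("vizslas", 0), ("goldfish", 5), ("trees", 3), ("cars", 2), ("perfumes", 1)]

-- A's inner 'for key, value in sue_criteria.items()' loop: false = break, true = fell through (else:)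
def adpInner (ranges : Bool) (dp : PySem.Dict String Int) : List (String × Int) → Bool
  | [] => true
  | (key, value) :: rest =>
    if dp.contains key = false then adpInner ranges dp rest          -- continue
    else if ranges && (key == "cats" || key == "trees") then
      (if dp.getD key 0 ≤ value then false else adpInner ranges dp rest)
    else if ranges && (key == "pomeranians" || key == "goldfish") then
      (if value ≤ dp.getD key 0 then false else adpInner ranges dp rest)
    else if dp.getD key 0 != value then false else adpInner ranges dp rest

def analyse_data_points (data : List (Int × (List (String × Int)))) (ranges : Bool) : Option Int :=
  match data with
  | [] => none
  | (sue, data_points) :: rest =>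
    if adpInner ranges (PySem.Dict.mk data_points) sue_criteria then some sue
    else analyse_data_points rest ranges

-- ===== PORT B =====
-- one filtering pass for the criterion (key, value): B's three comprehension branches
def adpPass (ranges : Bool) (key : String) (value : Int)
    (cand : List (Int × (List (String × Int)))) : List (Int × (List (String × Int))) :=
  if ranges && (key == "cats" || key == "trees") then
    cand.filter (fun sd => !(PySem.Dict.mk sd.2).contains key
      || decide (value < (PySem.Dict.mk sd.2).getD key 0))
  else if ranges && (key == "pomeranians" || key == "goldfish") then
    cand.filter (fun sd => !(PySem.Dict.mk sd.2).contains key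
      || decide ((PySem.Dict.mk sd.2).getD key 0 < value))
  else
    cand.filter (fun sd => !(PySem.Dict.mk sd.2).contains key
      || ((PySem.Dict.mk sd.2).getD key 0 == value))

def analyse_data_points_alt (data : List (Int × (List (String × Int)))) (ranges : Bool) : Option Int :=
  let candidates := sue_criteria.foldl (fun cand kv => adpPass ranges kv.1 kv.2 cand) data
  candidates.head?.map (·.1)

-- ===== PRECONDITION & SPEC =====
def Spec_analyse_data_points (data : List (Int × (List (String × Int)))) (ranges : Bool) (out : Option Int) : Prop := out = analyse_data_points_alt data ranges
instance (data : List (Int × (List (String × Int)))) (ranges : Bool) (out : Option Int) : Decidable (Spec_analyse_data_points data ranges out) := by unfold Spec_analyse_data_points; infer_instance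

-- ===== CLAIM =====
def Claim_equal_analyse_data_points : Prop := ∀ (data : List (Int × (List (String × Int)))) (ranges : Bool), Dom_analyse_data_points data ranges → Spec_analyse_data_points data ranges (analyse_data_points data ranges)

-- ===== LEMMAS AND PROOFS =====

-- the pointwise condition a sue's dict must satisfy for criterion (key, value)
def adpKeep (ranges : Bool) (key : String) (value : Int) (dp : PySem.Dict String Int) : Bool :=
  !dp.contains key ||
    (if ranges && (key == "cats" || key == "trees") then decide (value < dp.getD key 0)
     else if ranges && (key == "pomeranians" || key == "goldfish") then decide (dp.getD key 0 < value)
     else dp.getD key 0 == value)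

theorem adpPass_eq_filter (ranges : Bool) (key : String) (value : Int)
    (cand : List (Int × (List (String × Int)))) :
    adpPass ranges key value cand
      = cand.filter (fun sd => adpKeep ranges key value (PySem.Dict.mk sd.2)) := by
  unfold adpPass adpKeep
  split_ifs with h1 h2
  · simp
  · simp
  · simp

-- staged filtering over a criteria list = one filter by the conjunction of all criteria
theorem foldl_adpPass_eq (ranges : Bool) (l : List (String × Int))
    (cand : List (Int × (List (String × Int)))) :
    l.foldl (fun c kv => adpPass ranges kv.1 kv.2 c) cand
      = cand.filter (fun sd => l.all (fun kv => adpKeep ranges kv.1 kv.2 (PySem.Dict.mk sd.2))) := by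
  induction l generalizing cand with
  | nil => simp
  | cons kv rest ih =>
    rw [List.foldl_cons, adpPass_eq_filter, ih, List.filter_filter]
    simp [List.all_cons, Bool.and_comm]

-- A's inner loop equals the conjunction of the per-criterion keep conditions
theorem adpInner_eq_all (ranges : Bool) (dp : PySem.Dict String Int) (l : List (String × Int)) :
    adpInner ranges dp l = l.all (fun kv => adpKeep ranges kv.1 kv.2 dp) := by
  induction l with
  | nil => rfl
  | cons kv rest ih =>
    obtain ⟨key, value⟩ := kv
    show (if dp.contains key = false then adpInner ranges dp rest
          else if ranges && (key == "cats" || key == "trees") then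
            (if dp.getD key 0 ≤ value then false else adpInner ranges dp rest)
          else if ranges && (key == "pomeranians" || key == "goldfish") then
            (if value ≤ dp.getD key 0 then false else adpInner ranges dp rest)
          else if dp.getD key 0 != value then false else adpInner ranges dp rest) = _
    rw [ih]
    simp only [List.all_cons]
    rcases hc : dp.contains key with _ | _
    · simp [adpKeep, hc]
    · simp only [adpKeep, hc]
      split_ifs with h1 h2 h3 h4 h5 <;> simp_all

-- A's sue-major scan equals head-of-filter by the full predicate
theorem adp_eq_filter_head (data : List (Int × (List (String × Int)))) (ranges : Bool) :
    analyse_data_points data ranges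
      = ((data.filter (fun sd => adpInner ranges (PySem.Dict.mk sd.2) sue_criteria)).head?).map (·.1) := by
  induction data with
  | nil => rfl
  | cons sd rest ih =>
    obtain ⟨sue, dp⟩ := sd
    rw [analyse_data_points]
    rcases h : adpInner ranges (PySem.Dict.mk dp) sue_criteria with _ | _ <;>
      simp [h, ih]

theorem analyse_data_points_spec : Claim_equal_analyse_data_points := by
  intro data ranges _
  show analyse_data_points data ranges = analyse_data_points_alt data ranges
  rw [adp_eq_filter_head, analyse_data_points_alt]
  simp only [foldl_adpPass_eq, adpInner_eq_all]
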